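-- pv_equiv track=rewrite | github.com/GeumBinLee/Algorithms | second/음양 더하기.py | solution
-- ===== SOURCE A (Python) =====
-- def solution(absolutes, signs):
--     numbers = ["0" for _ in range(len(absolutes))]
--     for n in range(len(absolutes)) :
--         if str(signs[n]) == "True" :
--             numbers[n] = str(absolutes[n])
--         else :
--             numbers[n] = "-"+str(absolutes[n])
--     answer = list(map(int, numbers))
--     return sum(answer)
-- ===== SOURCE B (Python) =====
-- def solution(absolutes, signs):
--     total = sum(absolutes)
--     negatives = sum(a for a, s in zip(absolutes, signs) if not s)
--     return total - 2 * negatives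
-- ===== Notes on version B (the rewrite author's own statement) =====
-- stated objective: alternative
-- what changed: Replaces A's pipeline (build a string per element, overwrite a preallocated list, re-parse with int(), sum) by pure arithmetic: sum everything once, then subtract twice the sum of the negatively-signed entries over zip; no string formatting/parsing and no intermediate lists.
import Mathlib
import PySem

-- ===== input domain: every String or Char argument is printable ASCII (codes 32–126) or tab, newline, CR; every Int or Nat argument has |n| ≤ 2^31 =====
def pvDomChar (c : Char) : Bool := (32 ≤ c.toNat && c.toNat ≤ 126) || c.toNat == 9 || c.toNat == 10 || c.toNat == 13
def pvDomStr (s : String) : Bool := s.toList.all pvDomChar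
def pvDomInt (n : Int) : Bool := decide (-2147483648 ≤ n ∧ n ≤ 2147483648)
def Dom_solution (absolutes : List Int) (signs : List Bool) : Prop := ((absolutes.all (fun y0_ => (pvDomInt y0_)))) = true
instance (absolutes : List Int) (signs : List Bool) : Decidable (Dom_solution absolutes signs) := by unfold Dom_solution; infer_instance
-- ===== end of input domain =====

-- B replaces A's per-element str/int round trip with plain arithmetic (sum once, then subtract
-- twice the sum of the negatively-signed entries); the claim is about the return value.

-- ===== PORT A =====
-- Hand-port of Python `int(s)`: an exact transcription of PySem.Int.ofChars? (same algorithm,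
-- inlined here because PySem's digit-parsing core is a private definition without accessible
-- equation lemmas); it is exact exactly where PySem.Int.ofChars? is, i.e. on the stated ASCII domain.
def pyIntGo : List Char → Bool → Nat → Option Nat
  | [], afterDigit, acc => if afterDigit = true then some acc else none
  | c :: rest, afterDigit, acc =>
    if c.isDigit = true then pyIntGo rest true (acc * 10 + (c.toNat - '0'.toNat))
    else
      if c = '_' ∧ afterDigit = true then
        match rest with
        | d :: _ => if d.isDigit = true then pyIntGo rest false acc else none
        | [] => none
      else none
def pyIntDigitsVal? : List Char → Option Nat
  | [] => none
  | cs => pyIntGo cs false 0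

def pyIntOfChars? (s : List Char) : Option Int :=
  match (List.dropWhile PySem.Int.isIntSpace (List.dropWhile PySem.Int.isIntSpace s).reverse).reverse with
  | '-' :: ds => Option.map (fun n => -n) (do let a ← pyIntDigitsVal? ds; pure (a : Int))
  | '+' :: ds => Option.map (fun n => n) (do let a ← pyIntDigitsVal? ds; pure (a : Int))
  | ds => Option.map (fun n => n) (do let a ← pyIntDigitsVal? ds; pure (a : Int))

def pyIntOfStr? (s : String) : Option Int := pyIntOfChars? s.toList

-- numbers = ["0" for _ in range(len(absolutes))]; the for-loop overwrites numbers[n] in place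
-- (pySetD); str(signs[n]) == "True" is the if-test; answer = list(map(int, numbers)); sum(answer).
def solution (absolutes : List Int) (signs : List Bool) : Int :=
  let numbers0 := (List.range absolutes.length).map (fun _ => "0")
  let numbers := (List.range absolutes.length).foldl
    (fun numbers (n : Nat) =>
      PySem.List.pySetD numbers (n : Int)
        (if (if (PySem.List.pyGet? signs (n : Int)).getD false then "True" else "False") = "True"
         then PySem.Int.toStr ((PySem.List.pyGet? absolutes (n : Int)).getD 0)
         else "-" ++ PySem.Int.toStr ((PySem.List.pyGet? absolutes (n : Int)).getD 0)))
    numbers0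
  let answer := numbers.map (fun s => (pyIntOfStr? s).getD 0)
  answer.sum

-- ===== PORT B =====
def solution_alt (absolutes : List Int) (signs : List Bool) : Int :=
  let total := absolutes.sum
  let negatives := (absolutes.zip signs).foldl (fun acc p => if !p.2 then acc + p.1 else acc) 0
  total - 2 * negatives

-- ===== PRECONDITION & SPEC =====
-- Pre_ excludes exactly the inputs on which the Python A raises: signs shorter than absolutes
-- (IndexError on signs[n]) and a negative entry with a False sign (int("--k") is a ValueError).
def Pre_solution (absolutes : List Int) (signs : List Bool) : Prop :=
  absolutes.length ≤ signs.length ∧ ∀ p ∈ absolutes.zip signs, p.2 = false → 0 ≤ p.1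
instance (absolutes : List Int) (signs : List Bool) : Decidable (Pre_solution absolutes signs) := by
  unfold Pre_solution; infer_instance

def pvWitness_solution : List Int × List Bool := ([4, 7, 12], [true, false, true])

def Spec_solution (absolutes : List Int) (signs : List Bool) (out : Int) : Prop :=
  out = solution_alt absolutes signs
instance (absolutes : List Int) (signs : List Bool) (out : Int) : Decidable (Spec_solution absolutes signs out) := by
  unfold Spec_solution; infer_instance

-- ===== CLAIM (what is proved, stated in full; the proofs are below) =====
def Claim_equal_solution : Prop := ∀ (absolutes : List Int) (signs : List Bool),
  Dom_solution absolutes signs → Pre_solution absolutes signs →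
  Spec_solution absolutes signs (solution absolutes signs)

-- ===== LEMMAS AND PROOFS =====
-- the per-digit accumulator step of int()
def pvStep (a : Nat) (c : Char) : Nat := a * 10 + (c.toNat - '0'.toNat)

theorem pvGo_digits : ∀ (ds : List Char) (b : Bool) (acc : Nat),
    (∀ c ∈ ds, c.isDigit = true) → (b = true ∨ ds ≠ []) →
    pyIntGo ds b acc = some (ds.foldl pvStep acc) := by
  intro ds
  induction ds with
  | nil => rintro b acc _ (hb | hne) <;> simp_all [pyIntGo]
  | cons c rest ih =>
    intro b acc hd _
    have hc : c.isDigit = true := hd c (by simp)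
    simp only [pyIntGo, hc, if_pos]
    rw [ih true _ (fun x hx => hd x (by simp [hx])) (Or.inl rfl)]
    simp [pvStep]

theorem pvFoldl_toDigits (m : Nat) : ∀ acc,
    (Nat.toDigits 10 m).foldl pvStep acc = acc * 10 ^ (Nat.toDigits 10 m).length + m := by
  induction m using Nat.strong_induction_on with
  | _ m ih =>
    intro acc
    by_cases hm : m < 10
    · rw [Nat.toDigits_of_lt_base hm]
      have : (Nat.digitChar m).toNat - 48 = m := by
        interval_cases m <;> rfl
      simp [pvStep, show '0'.toNat = 48 from rfl, this]
    · rw [Nat.toDigits_eq_if (by norm_num)]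
      simp only [hm, if_neg, if_false]
      rw [List.foldl_append]
      have h10 : m / 10 < m := Nat.div_lt_self (by omega) (by norm_num)
      rw [ih (m / 10) h10 acc]
      have hmod : (Nat.digitChar (m % 10)).toNat - 48 = m % 10 := by
        have : m % 10 < 10 := Nat.mod_lt _ (by norm_num)
        interval_cases h : m % 10 <;> rfl
      simp only [List.foldl_cons, List.foldl_nil, pvStep, show '0'.toNat = 48 from rfl, hmod, List.length_append,
        List.length_cons, List.length_nil]
      rw [pow_succ]
      have := Nat.div_add_mod m 10
      ring_nf
      omega
theorem pvDigit_not_space {c : Char} (h : c.isDigit = true) : PySem.Int.isIntSpace c = false := by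
  simp only [Char.isDigit, decide_eq_true_eq] at h
  simp only [PySem.Int.isIntSpace, Bool.or_eq_false_iff, decide_eq_false_iff_not]
  refine ⟨⟨⟨⟨⟨?_, ?_⟩, ?_⟩, ?_⟩, ?_⟩, ?_⟩ <;> rintro rfl <;> simp_all

theorem pvDropWhile_digits (l : List Char) (h : ∀ c ∈ l, c.isDigit = true) :
    l.dropWhile PySem.Int.isIntSpace = l := by
  cases l with
  | nil => rfl
  | cons c rest => rw [List.dropWhile_cons_of_neg]; simp [pvDigit_not_space (h c (by simp))]

theorem pvParse_digits (l : List Char) (hd : ∀ c ∈ l, c.isDigit = true) (hne : l ≠ []) :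
    pyIntOfChars? l = some ((l.foldl pvStep 0 : Nat) : Int) := by
  have hrev : ∀ c ∈ l.reverse, c.isDigit = true := by simpa using hd
  unfold pyIntOfChars?
  rw [pvDropWhile_digits l hd, pvDropWhile_digits l.reverse hrev, List.reverse_reverse]
  obtain ⟨c, rest, rfl⟩ := List.exists_cons_of_ne_nil hne
  have hc : c.isDigit = true := hd c (by simp)
  beta_reduce
  split
  · rename_i ds heq
    exact absurd hc (by cases heq; decide)
  · rename_i ds heq
    exact absurd hc (by cases heq; decide)
  · simp [pyIntDigitsVal?, pvGo_digits _ false 0 hd (Or.inr (by simp))]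

theorem pvParse_neg (l : List Char) (hd : ∀ c ∈ l, c.isDigit = true) (hne : l ≠ []) :
    pyIntOfChars? ('-' :: l) = some (-((l.foldl pvStep 0 : Nat) : Int)) := by
  obtain ⟨c, rest, rfl⟩ := List.exists_cons_of_ne_nil hne
  have hc : c.isDigit = true := hd c (by simp)
  unfold pyIntOfChars?
  rw [List.dropWhile_cons_of_neg (by decide)]
  rw [List.reverse_cons]
  have hrev : ∀ x ∈ (c :: rest).reverse ++ ['-'], PySem.Int.isIntSpace x = false → True := fun _ _ _ => trivial
  rw [show ((c :: rest).reverse ++ ['-']).dropWhile PySem.Int.isIntSpace = (c :: rest).reverse ++ ['-'] from ?_]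
  · rw [show ((c :: rest).reverse ++ ['-']).reverse = '-' :: (c :: rest) by simp]
    split
    · rename_i ds heq
      cases heq
      simp [pyIntDigitsVal?, pvGo_digits _ false 0 hd (Or.inr (by simp))]
    · rename_i ds heq; cases heq
    · rename_i h1 h2
      exact absurd rfl (h1 (c :: rest))
  · cases hrc : (c :: rest).reverse with
    | nil => simp at hrc
    | cons x xs =>
      rw [List.cons_append, List.dropWhile_cons_of_neg]
      have : x ∈ (c :: rest).reverse := by rw [hrc]; simp
      simp [pvDigit_not_space (hd x (List.mem_reverse.mp this))]
theorem pvRt_toDigits (m : Nat) : pyIntOfChars? (Nat.toDigits 10 m) = some (m : Int) := by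
  have hd : ∀ c ∈ Nat.toDigits 10 m, c.isDigit = true :=
    fun c hc => Nat.isDigit_of_mem_toDigits (by norm_num) (by norm_num) hc
  have hne : Nat.toDigits 10 m ≠ [] := List.ne_nil_of_length_pos Nat.length_toDigits_pos
  rw [pvParse_digits _ hd hne, pvFoldl_toDigits m 0]
  simp

theorem pvRt_str (n : Int) : pyIntOfStr? (PySem.Int.toStr n) = some n := by
  unfold pyIntOfStr?
  rw [PySem.Int.toList_toStr]
  unfold PySem.Int.toChars
  split
  · rename_i hneg
    have hd : ∀ c ∈ Nat.toDigits 10 n.natAbs, c.isDigit = true :=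
      fun c hc => Nat.isDigit_of_mem_toDigits (by norm_num) (by norm_num) hc
    rw [pvParse_neg _ hd (List.ne_nil_of_length_pos Nat.length_toDigits_pos), pvFoldl_toDigits _ 0]
    simp only [Nat.zero_mul, Nat.zero_add, Option.some.injEq]
    omega
  · rw [pvRt_toDigits]
    rename_i hpos
    simp only [Option.some.injEq]
    omega

theorem pvRt_negStr (a : Int) (h : 0 ≤ a) : pyIntOfStr? ("-" ++ PySem.Int.toStr a) = some (-a) := by
  unfold pyIntOfStr?
  rw [show ("-" ++ PySem.Int.toStr a).toList = '-' :: (PySem.Int.toStr a).toList by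
        simp [String.toList_append]]
  rw [PySem.Int.toList_toStr]
  unfold PySem.Int.toChars
  rw [if_neg (by omega)]
  have hd : ∀ c ∈ Nat.toDigits 10 a.toNat, c.isDigit = true :=
    fun c hc => Nat.isDigit_of_mem_toDigits (by norm_num) (by norm_num) hc
  rw [pvParse_neg _ hd (List.ne_nil_of_length_pos Nat.length_toDigits_pos), pvFoldl_toDigits _ 0]
  simp only [Nat.zero_mul, Nat.zero_add, Option.some.injEq]
  omega

theorem pvFoldl_set_range {α : Type} (f : Nat → α) :
    ∀ (k : Nat) (init : List α), k ≤ init.length →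
    (List.range k).foldl (fun ns n => ns.set n (f n)) init
      = ((List.range k).map f) ++ init.drop k := by
  intro k
  induction k with
  | zero => simp
  | succ k ih =>
    intro init hk
    rw [List.range_succ, List.foldl_append, ih init (by omega)]
    simp only [List.foldl_cons, List.foldl_nil, List.map_append, List.map_cons, List.map_nil]
    rw [List.set_append]
    have hlen : ((List.range k).map f).length = k := by simp
    rw [if_neg (by omega), hlen]
    simp only [Nat.sub_self]
    rw [show List.drop k init = init[k] :: List.drop (k + 1) init from
          List.drop_eq_getElem_cons (by omega), List.set_cons_zero]
    simp [List.append_assoc]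
theorem pvMap_range_signed : ∀ (as : List Int) (ss : List Bool), as.length ≤ ss.length →
    (List.range as.length).map (fun n => if ss[n]?.getD false = true then as[n]?.getD 0 else -(as[n]?.getD 0))
      = List.zipWith (fun a s => if s = true then a else -a) as ss := by
  intro as
  induction as with
  | nil => simp
  | cons a as ih =>
    intro ss hlen
    cases ss with
    | nil => simp at hlen
    | cons s ss =>
      rw [List.length_cons, List.range_succ_eq_map, List.map_cons, List.map_map]
      simp only [List.getElem?_cons_zero, Option.getD_some, Function.comp_def,
        List.getElem?_cons_succ, List.zipWith_cons_cons]
      rw [ih ss (by simpa using hlen)]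

theorem pvFold_acc (zs : List (Int × Bool)) : ∀ (acc : Int),
    zs.foldl (fun acc p => if !p.2 then acc + p.1 else acc) acc
      = acc + zs.foldl (fun acc p => if !p.2 then acc + p.1 else acc) 0 := by
  induction zs with
  | nil => simp
  | cons z zs ih =>
    intro acc
    simp only [List.foldl_cons]
    rw [ih, ih (if !z.2 then 0 + z.1 else 0)]
    split <;> ring

theorem pvSum_zipWith : ∀ (as : List Int) (ss : List Bool), as.length ≤ ss.length →
    (List.zipWith (fun a s => if s = true then a else -a) as ss).sum
      = as.sum - 2 * (as.zip ss).foldl (fun acc p => if !p.2 then acc + p.1 else acc) 0 := by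
  intro as
  induction as with
  | nil => simp
  | cons a as ih =>
    intro ss hlen
    cases ss with
    | nil => simp at hlen
    | cons s ss =>
      rw [List.zipWith_cons_cons, List.sum_cons, List.zip_cons_cons, List.foldl_cons,
        ih ss (by simpa using hlen)]
      cases s
      · rw [pvFold_acc (as.zip ss) (if !(false : Bool) then 0 + a else 0)]
        simp only [Bool.not_false, if_true, ite_true, Bool.false_eq_true, ite_false, List.sum_cons]
        ring
      · rw [pvFold_acc (as.zip ss) (if !(true : Bool) then 0 + a else 0)]
        simp only [Bool.not_true, if_false, ite_true, Bool.false_eq_true, ite_false, List.sum_cons]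
        ring
theorem pv_main (absolutes : List Int) (signs : List Bool) (hpre : Pre_solution absolutes signs) :
    solution absolutes signs = solution_alt absolutes signs := by
  obtain ⟨hlen, hneg⟩ := hpre
  unfold solution solution_alt
  simp only [PySem.List.pySetD_natCast, PySem.List.pyGet?_natCast]
  rw [pvFoldl_set_range _ absolutes.length ((List.range absolutes.length).map (fun _ => "0")) (by simp)]
  rw [List.drop_eq_nil_of_le (by simp), List.append_nil, List.map_map]
  rw [List.map_congr_left
      (l := List.range absolutes.length)
      (g := fun n => if signs[n]?.getD false = true then absolutes[n]?.getD 0 else -(absolutes[n]?.getD 0))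
      ?_]
  · rw [pvMap_range_signed absolutes signs hlen, pvSum_zipWith absolutes signs hlen]
  · intro n hn
    have hnL : n < absolutes.length := List.mem_range.mp hn
    have hs : signs[n]? = some signs[n] := List.getElem?_eq_getElem (by omega)
    have ha : absolutes[n]? = some absolutes[n] := List.getElem?_eq_getElem hnL
    simp only [Function.comp_def, hs, ha, Option.getD_some]
    cases hsv : signs[n] with
    | true =>
      simp only [if_pos, ite_true, pvRt_str, Option.getD_some]
    | false =>
      have hzlen : n < (absolutes.zip signs).length := by
        rw [List.length_zip]; omega
      have hzip : (absolutes[n], signs[n]) ∈ absolutes.zip signs := by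
        have h1 : (absolutes.zip signs)[n] = (absolutes[n], signs[n]) := List.getElem_zip (i := n)
        rw [← h1]
        exact List.getElem_mem hzlen
      have hge : 0 ≤ absolutes[n] := hneg _ hzip (by rw [hsv])
      simp only [Bool.false_eq_true, ite_false, show ("False" = "True") = False by simp]
      rw [pvRt_negStr _ hge]
      simp

-- ===== VERDICT (by name: the statement is the Claim_ definition above) =====
theorem solution_spec : Claim_equal_solution := by
  intro absolutes signs _ hpre
  unfold Spec_solution
  exact pv_main absolutes signs hpre
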